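-- pv_equiv track=rewrite | github.com/sammp2006/GRAF-UR | dependencias.py | crear_cuadrantes
-- ===== SOURCE A (Python) =====
-- def crear_cuadrantes(nodos):
--     """
--     Separar los nodos de un grafo en 9 cuadrantes:
--
--         1 - NorOccidente
--         2 - Norte
--         3 - NorOriente
--         4 - Occidente
--         5 - Centro
--         6 - Oriente
--         7 - SurOccidente
--         8 - Sur
--         9 - SurOriente
--
--     Para luego seleccionar un punto aleatorio del cuadrante
--     """
--
--     coordenadas_x = {e: d["x"] for e, d in nodos}
--     coordenadas_y = {e: d["y"] for e, d in nodos}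
--
--     llaves_por_eje_x = sorted(coordenadas_x, key=lambda x: coordenadas_x[x])
--     llaves_por_eje_y = sorted(coordenadas_y, key=lambda x: coordenadas_y[x])
--
--     # Separar los nodos en tercios para cada eje
--     longitud_x = len(llaves_por_eje_x)
--     longitud_y = len(llaves_por_eje_y)
--
--     separacion_1x = llaves_por_eje_x[:longitud_x // 3]
--     separacion_2x = llaves_por_eje_x[longitud_x // 3:longitud_x * 2 // 3]
--     separacion_3x = llaves_por_eje_x[longitud_x * 2 // 3:]
--     separacion_x = [separacion_1x, separacion_2x, separacion_3x]
--
--     separacion_1y = llaves_por_eje_y[:longitud_y // 3]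
--     separacion_2y = llaves_por_eje_y[longitud_y // 3:longitud_y * 2 // 3]
--     separacion_3y = llaves_por_eje_y[longitud_y * 2 // 3:]
--     separacion_y = [separacion_1y, separacion_2y, separacion_3y]
--
--     cuadrantes = {}
--
--     cuadrantes[1] = set(separacion_x[0]) & set(separacion_y[2])  # NorOccidente
--     cuadrantes[2] = set(separacion_x[1]) & set(separacion_y[2])  # Norte
--     cuadrantes[3] = set(separacion_x[2]) & set(separacion_y[2])  # NorOriente
--     cuadrantes[4] = set(separacion_x[0]) & set(separacion_y[1])  # Occidente
--     cuadrantes[5] = set(separacion_x[1]) & set(separacion_y[1])  # Centro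
--     cuadrantes[6] = set(separacion_x[2]) & set(separacion_y[1])  # Oriente
--     cuadrantes[7] = set(separacion_x[0]) & set(separacion_y[0])  # SurOccidente
--     cuadrantes[8] = set(separacion_x[1]) & set(separacion_y[0])  # Sur
--     cuadrantes[9] = set(separacion_x[2]) & set(separacion_y[0])  # SurOriente
--
--     return cuadrantes
-- ===== SOURCE B (Python) =====
-- def crear_cuadrantes(nodos):
--     """Una pasada por rangos: calcula el tercio de cada nodo en x e y
--     comparando su posicion ordenada con los cortes n//3 y n*2//3 y lo
--     agrega directamente a su cuadrante (sin cortar listas ni intersecar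
--     conjuntos)."""
--     coordenadas_x = {e: d["x"] for e, d in nodos}
--     coordenadas_y = {e: d["y"] for e, d in nodos}
--
--     llaves_x = sorted(coordenadas_x, key=lambda k: coordenadas_x[k])
--     llaves_y = sorted(coordenadas_y, key=lambda k: coordenadas_y[k])
--
--     n = len(llaves_x)
--     rango_y = {k: i for i, k in enumerate(llaves_y)}
--
--     def tercio(i):
--         if i < n // 3:
--             return 0
--         if i < n * 2 // 3:
--             return 1
--         return 2
--
--     cuadrantes = {q: set() for q in range(1, 10)}
--     for i, k in enumerate(llaves_x):
--         cuadrantes[(2 - tercio(rango_y[k])) * 3 + tercio(i) + 1].add(k)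
--     return cuadrantes
-- ===== Notes on version B (the rewrite author's own statement) =====
-- stated objective: alternative
-- what changed: Instead of cutting the two sorted key lists into 3+3 slice lists and computing nine set intersections, B builds a y-rank index once and makes a single pass over the x-sorted keys, computing each key's x- and y-third by comparing its rank with the cutoffs n//3 and n*2//3 and adding it directly to quadrant (2-y_third)*3+x_third+1 of nine pre-initialised sets.
import Mathlib
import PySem

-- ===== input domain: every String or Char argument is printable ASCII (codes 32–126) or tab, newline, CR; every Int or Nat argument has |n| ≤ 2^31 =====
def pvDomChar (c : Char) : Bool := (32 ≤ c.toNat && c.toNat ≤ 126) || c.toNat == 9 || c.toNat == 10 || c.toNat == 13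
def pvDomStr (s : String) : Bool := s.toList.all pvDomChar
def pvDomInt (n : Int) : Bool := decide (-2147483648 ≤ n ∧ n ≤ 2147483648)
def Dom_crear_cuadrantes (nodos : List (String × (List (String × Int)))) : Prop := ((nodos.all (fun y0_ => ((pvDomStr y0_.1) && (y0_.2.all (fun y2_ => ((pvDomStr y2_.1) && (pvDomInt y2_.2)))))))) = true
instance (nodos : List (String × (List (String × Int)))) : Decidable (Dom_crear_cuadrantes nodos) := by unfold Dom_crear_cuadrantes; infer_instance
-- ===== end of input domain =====

-- B replaces A's six list slices and nine set intersections by one pass that sends each key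
-- straight to its quadrant, comparing its sorted x- and y-positions with the cutoffs n//3, n*2//3
-- (objective: alternative decomposition, same O(n log n) cost).

-- ===== PORT A =====
-- shared helper: the two dict comprehensions '{e: d["x"] for e, d in nodos}' — these lines are
-- identical in A and in B, so both ports use them. d["x"] is a first-match association lookup;
-- the 0 default is never used on inputs satisfying Pre_ (the key is present).
def pvCoordX (nodos : List (String × (List (String × Int)))) : PySem.Dict String Int :=
  nodos.foldl (fun d p => d.insert p.1 ((PySem.Dict.mk p.2).getD "x" 0)) PySem.Dict.empty
def pvCoordY (nodos : List (String × (List (String × Int)))) : PySem.Dict String Int :=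
  nodos.foldl (fun d p => d.insert p.1 ((PySem.Dict.mk p.2).getD "y" 0)) PySem.Dict.empty

def crear_cuadrantes (nodos : List (String × (List (String × Int)))) : List (Int × List String) :=
  let coordenadas_x := pvCoordX nodos
  let coordenadas_y := pvCoordY nodos
  let llaves_por_eje_x := PySem.List.sorted coordenadas_x.keys (fun k => coordenadas_x.getD k 0) false
  let llaves_por_eje_y := PySem.List.sorted coordenadas_y.keys (fun k => coordenadas_y.getD k 0) false
  let longitud_x : Int := llaves_por_eje_x.length
  let longitud_y : Int := llaves_por_eje_y.length
  let separacion_1x := PySem.List.slice llaves_por_eje_x none (some (PySem.Int.floordiv longitud_x 3))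
  let separacion_2x := PySem.List.slice llaves_por_eje_x (some (PySem.Int.floordiv longitud_x 3)) (some (PySem.Int.floordiv (longitud_x * 2) 3))
  let separacion_3x := PySem.List.slice llaves_por_eje_x (some (PySem.Int.floordiv (longitud_x * 2) 3)) none
  let separacion_1y := PySem.List.slice llaves_por_eje_y none (some (PySem.Int.floordiv longitud_y 3))
  let separacion_2y := PySem.List.slice llaves_por_eje_y (some (PySem.Int.floordiv longitud_y 3)) (some (PySem.Int.floordiv (longitud_y * 2) 3))
  let separacion_3y := PySem.List.slice llaves_por_eje_y (some (PySem.Int.floordiv (longitud_y * 2) 3)) none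
  let cuadrantes :=
    (((((((((PySem.Dict.empty.insert 1 (PySem.Set.inter (PySem.Set.ofList separacion_1x) (PySem.Set.ofList separacion_3y))).insert
      2 (PySem.Set.inter (PySem.Set.ofList separacion_2x) (PySem.Set.ofList separacion_3y))).insert
      3 (PySem.Set.inter (PySem.Set.ofList separacion_3x) (PySem.Set.ofList separacion_3y))).insert
      4 (PySem.Set.inter (PySem.Set.ofList separacion_1x) (PySem.Set.ofList separacion_2y))).insert
      5 (PySem.Set.inter (PySem.Set.ofList separacion_2x) (PySem.Set.ofList separacion_2y))).insert
      6 (PySem.Set.inter (PySem.Set.ofList separacion_3x) (PySem.Set.ofList separacion_2y))).insert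
      7 (PySem.Set.inter (PySem.Set.ofList separacion_1x) (PySem.Set.ofList separacion_1y))).insert
      8 (PySem.Set.inter (PySem.Set.ofList separacion_2x) (PySem.Set.ofList separacion_1y))).insert
      9 (PySem.Set.inter (PySem.Set.ofList separacion_3x) (PySem.Set.ofList separacion_1y)))
  cuadrantes.items

-- ===== PORT B =====
-- tercio(i): which third of [0, n) the position i falls in (0, 1 or 2); n is B's closure variable
def pvTercio (n i : Int) : Int :=
  if i < PySem.Int.floordiv n 3 then 0
  else if i < PySem.Int.floordiv (n * 2) 3 then 1
  else 2

def crear_cuadrantes_alt (nodos : List (String × (List (String × Int)))) : List (Int × List String) :=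
  let coordenadas_x := pvCoordX nodos
  let coordenadas_y := pvCoordY nodos
  let llaves_x := PySem.List.sorted coordenadas_x.keys (fun k => coordenadas_x.getD k 0) false
  let llaves_y := PySem.List.sorted coordenadas_y.keys (fun k => coordenadas_y.getD k 0) false
  let n : Int := llaves_x.length
  let rango_y : PySem.Dict String Int :=
    (PySem.List.enumerate llaves_y).foldl (fun d p => d.insert p.2 p.1) PySem.Dict.empty
  let cuadrantes0 : PySem.Dict Int (PySem.Set String) :=
    (PySem.List.pyRange 1 10 1).foldl (fun d q => d.insert q PySem.Set.empty) PySem.Dict.empty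
  let cuadrantes :=
    (PySem.List.enumerate llaves_x).foldl
      (fun d p => d.modify ((2 - pvTercio n (rango_y.getD p.2 0)) * 3 + pvTercio n p.1 + 1)
        PySem.Set.empty (fun s => PySem.Set.add s p.2)) cuadrantes0
  cuadrantes.items

-- ===== PRECONDITION & SPEC =====
-- Pre_ excludes exactly the inputs on which A raises KeyError: a node whose dict lacks "x" or "y".
def Pre_crear_cuadrantes (nodos : List (String × (List (String × Int)))) : Prop :=
  ∀ p ∈ nodos, "x" ∈ p.2.map Prod.fst ∧ "y" ∈ p.2.map Prod.fst
instance (nodos : List (String × (List (String × Int)))) : Decidable (Pre_crear_cuadrantes nodos) := by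
  unfold Pre_crear_cuadrantes; infer_instance

def pvWitness_crear_cuadrantes : (List (String × (List (String × Int)))) :=
  [("a", [("x", 0), ("y", 0)]), ("b", [("x", 3), ("y", 1)]), ("c", [("x", 1), ("y", 4)])]

def Spec_crear_cuadrantes (nodos : List (String × (List (String × Int)))) (out : List (Int × List String)) : Prop := out = crear_cuadrantes_alt nodos
instance (nodos : List (String × (List (String × Int)))) (out : List (Int × List String)) : Decidable (Spec_crear_cuadrantes nodos out) := by unfold Spec_crear_cuadrantes; infer_instance

-- ===== CLAIM (what is proved, stated in full; the proofs are below) =====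
def Claim_equal_crear_cuadrantes : Prop := ∀ (nodos : List (String × (List (String × Int)))), Dom_crear_cuadrantes nodos → Pre_crear_cuadrantes nodos → Spec_crear_cuadrantes nodos (crear_cuadrantes nodos)

-- ===== LEMMAS AND PROOFS =====

-- proof-side abbreviations for the two bodies after the (shared) sorting lines
def pvRangoY (ly : List String) : PySem.Dict String Int :=
  (PySem.List.enumerate ly).foldl (fun d p => d.insert p.2 p.1) PySem.Dict.empty

def pvF (lx ly : List String) (p : Int × String) : Int :=
  (2 - pvTercio (lx.length : Int) ((pvRangoY ly).getD p.2 0)) * 3 + pvTercio (lx.length : Int) p.1 + 1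

def pvInit : PySem.Dict Int (PySem.Set String) :=
  (PySem.List.pyRange 1 10 1).foldl (fun d q => d.insert q PySem.Set.empty) PySem.Dict.empty

def pvBodyB (lx ly : List String) : List (Int × List String) :=
  ((PySem.List.enumerate lx).foldl
    (fun d p => d.modify (pvF lx ly p) PySem.Set.empty (fun s => PySem.Set.add s p.2)) pvInit).items

def pvBodyA (lx ly : List String) : List (Int × List String) :=
  let longitud_x : Int := lx.length
  let longitud_y : Int := ly.length
  let s1x := PySem.List.slice lx none (some (PySem.Int.floordiv longitud_x 3))
  let s2x := PySem.List.slice lx (some (PySem.Int.floordiv longitud_x 3)) (some (PySem.Int.floordiv (longitud_x * 2) 3))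
  let s3x := PySem.List.slice lx (some (PySem.Int.floordiv (longitud_x * 2) 3)) none
  let s1y := PySem.List.slice ly none (some (PySem.Int.floordiv longitud_y 3))
  let s2y := PySem.List.slice ly (some (PySem.Int.floordiv longitud_y 3)) (some (PySem.Int.floordiv (longitud_y * 2) 3))
  let s3y := PySem.List.slice ly (some (PySem.Int.floordiv (longitud_y * 2) 3)) none
  (((((((((PySem.Dict.empty.insert 1 (PySem.Set.inter (PySem.Set.ofList s1x) (PySem.Set.ofList s3y))).insert
      2 (PySem.Set.inter (PySem.Set.ofList s2x) (PySem.Set.ofList s3y))).insert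
      3 (PySem.Set.inter (PySem.Set.ofList s3x) (PySem.Set.ofList s3y))).insert
      4 (PySem.Set.inter (PySem.Set.ofList s1x) (PySem.Set.ofList s2y))).insert
      5 (PySem.Set.inter (PySem.Set.ofList s2x) (PySem.Set.ofList s2y))).insert
      6 (PySem.Set.inter (PySem.Set.ofList s3x) (PySem.Set.ofList s2y))).insert
      7 (PySem.Set.inter (PySem.Set.ofList s1x) (PySem.Set.ofList s1y))).insert
      8 (PySem.Set.inter (PySem.Set.ofList s2x) (PySem.Set.ofList s1y))).insert
      9 (PySem.Set.inter (PySem.Set.ofList s3x) (PySem.Set.ofList s1y))).items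

-- third boundaries as Nat indices, and the corresponding contiguous segment of a list
def pvCut (len : Nat) (t : Int) : Nat :=
  if t ≤ 0 then 0 else if t = 1 then len / 3 else if t = 2 then len * 2 / 3 else len

def pvSeg (l : List String) (t : Int) : List String :=
  (l.drop (pvCut l.length t)).take (pvCut l.length (t + 1) - pvCut l.length t)

def pvG (lx ly : List String) (q : Int) : List String :=
  ((PySem.List.enumerate lx).filter (fun p => pvF lx ly p == q)).map (·.2)

def pvI (lx ly : List String) (tx ty : Int) : List String :=
  PySem.Set.inter (PySem.Set.ofList (pvSeg lx tx)) (PySem.Set.ofList (pvSeg ly ty))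

lemma pv_fd2 (len : Nat) : PySem.Int.floordiv ((len : Int) * 2) 3 = ((len * 2 / 3 : Nat) : Int) := by
  rw [show ((len : Int) * 2) = ((len * 2 : Nat) : Int) by push_cast; ring]
  exact_mod_cast PySem.Int.floordiv_natCast (len * 2) 3

lemma pv_fd1 (len : Nat) : PySem.Int.floordiv (len : Int) 3 = ((len / 3 : Nat) : Int) := by
  exact_mod_cast PySem.Int.floordiv_natCast len 3

lemma pv_seg0 (l : List String) :
    PySem.List.slice l none (some (PySem.Int.floordiv (l.length : Int) 3)) = pvSeg l 0 := by
  rw [pv_fd1, PySem.List.slice_to_natCast]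
  simp [pvSeg, pvCut]

lemma pv_seg1 (l : List String) :
    PySem.List.slice l (some (PySem.Int.floordiv (l.length : Int) 3))
      (some (PySem.Int.floordiv ((l.length : Int) * 2) 3)) = pvSeg l 1 := by
  rw [pv_fd1, pv_fd2, PySem.List.slice_natCast]
  simp [pvSeg, pvCut]

lemma pv_seg2 (l : List String) :
    PySem.List.slice l (some (PySem.Int.floordiv ((l.length : Int) * 2) 3)) none = pvSeg l 2 := by
  rw [pv_fd2, PySem.List.slice_from_natCast]
  simp only [pvSeg, pvCut]
  norm_num

lemma pv_itemsA (v1 v2 v3 v4 v5 v6 v7 v8 v9 : List String) :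
    ((((((((((PySem.Dict.empty.insert 1 v1).insert 2 v2).insert 3 v3).insert 4 v4).insert 5 v5).insert
        6 v6).insert 7 v7).insert 8 v8).insert 9 v9) : PySem.Dict Int (List String)).items
      = [(1, v1), (2, v2), (3, v3), (4, v4), (5, v5), (6, v6), (7, v7), (8, v8), (9, v9)] := by
  rfl

lemma pv_tercio_cases (n i : Int) : pvTercio n i = 0 ∨ pvTercio n i = 1 ∨ pvTercio n i = 2 := by
  unfold pvTercio; split_ifs <;> simp

lemma pv_tercio_iff (len k : Nat) (t : Int) (hk : k < len) (ht : t = 0 ∨ t = 1 ∨ t = 2) :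
    pvTercio (len : Int) (k : Int) = t ↔ (pvCut len t ≤ k ∧ k < pvCut len (t + 1)) := by
  unfold pvTercio
  rw [pv_fd1, pv_fd2]
  rcases ht with rfl | rfl | rfl <;> simp only [pvCut] <;> split_ifs <;> omega

lemma pv_mem_drop_take {α} [DecidableEq α] (l : List α) (hl : l.Nodup) (a m : Nat) (x : α) :
    x ∈ (l.drop a).take m ↔ x ∈ l ∧ a ≤ l.idxOf x ∧ l.idxOf x < a + m := by
  constructor
  · intro h
    have hx : x ∈ l := List.mem_of_mem_drop (List.mem_of_mem_take h)
    obtain ⟨k, hk, hget⟩ := List.getElem_of_mem h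
    have hk2 := hk
    simp [List.length_take, List.length_drop] at hk2
    rw [List.getElem_take, List.getElem_drop] at hget
    have hil : l.idxOf x < l.length := List.idxOf_lt_length_of_mem hx
    have hidx : a + k = l.idxOf x := by
      have h2 : l[l.idxOf x] = x := List.getElem_idxOf hil
      exact (List.Nodup.getElem_inj_iff hl).mp (hget.trans h2.symm)
    exact ⟨hx, by omega, by omega⟩
  · rintro ⟨hx, h1, h2⟩
    have hil : l.idxOf x < l.length := List.idxOf_lt_length_of_mem hx
    have hb : l.idxOf x - a < min m (l.drop a).length := by
      simp [List.length_drop]; omega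
    have hval : ((l.drop a).take m)[l.idxOf x - a]'(by simpa [List.length_take] using hb) = x := by
      rw [List.getElem_take, List.getElem_drop]
      have hcast : l[a + (l.idxOf x - a)]'(by omega) = l[l.idxOf x] := by
        congr 1; omega
      rw [hcast]
      exact List.getElem_idxOf hil
    rw [← hval]
    exact List.getElem_mem _

lemma pv_mem_seg (l : List String) (hl : l.Nodup) (t : Int) (ht : t = 0 ∨ t = 1 ∨ t = 2) (x : String) :
    x ∈ pvSeg l t ↔ x ∈ l ∧ pvCut l.length t ≤ l.idxOf x ∧ l.idxOf x < pvCut l.length (t + 1) := by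
  unfold pvSeg
  rw [pv_mem_drop_take l hl]
  refine and_congr_right fun _ => ?_
  rcases ht with rfl | rfl | rfl <;> simp only [pvCut] <;> split_ifs <;> omega

lemma pv_rango_getD (ly : List String) (hy : ly.Nodup) (x : String) (hx : x ∈ ly) :
    (pvRangoY ly).getD x 0 = (ly.idxOf x : Int) := by
  have hitems : (pvRangoY ly).items = (PySem.List.enumerate ly).map (fun p => (p.2, p.1)) := by
    unfold pvRangoY
    have h := PySem.Dict.items_foldl_insert_fresh (PySem.List.enumerate ly) (fun p => p.2)
      (fun p => p.1) PySem.Dict.empty (by intro a _; rfl)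
      (by rw [PySem.List.map_snd_enumerate]; exact hy)
    simpa using h
  have hkeys : (pvRangoY ly).keys = ly := by
    show (pvRangoY ly).items.map (·.1) = ly
    rw [hitems, List.map_map]
    have hco : ((·.1) ∘ fun p : Int × String => (p.2, p.1)) = (·.2) := rfl
    rw [hco, PySem.List.map_snd_enumerate]
  apply PySem.Dict.getD_of_mem_items
  · rw [hitems]
    refine List.mem_map.mpr ⟨((ly.idxOf x : Int), x), ?_, rfl⟩
    refine (PySem.List.mem_enumerate_iff ly 0 _).mpr ⟨ly.idxOf x, List.idxOf_lt_length_of_mem hx, ?_⟩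
    rw [List.getElem_idxOf]; simp
  · rw [hkeys]; exact hy

lemma pv_getD_fold_add (f : Int × String → Int) (L : List (Int × String))
    (d : PySem.Dict Int (PySem.Set String)) (q : Int)
    (hnd : (L.map (·.2)).Nodup)
    (hdisj : ∀ p ∈ L, p.2 ∉ d.getD (f p) PySem.Set.empty) :
    (L.foldl (fun d p => d.modify (f p) PySem.Set.empty (fun s => PySem.Set.add s p.2)) d).getD q PySem.Set.empty
      = d.getD q PySem.Set.empty ++ (L.filter (fun p => f p == q)).map (·.2) := by
  induction L generalizing d with
  | nil => simp
  | cons p L ih =>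
    simp only [List.map_cons, List.nodup_cons] at hnd
    have hmemp : p.2 ∉ d.getD (f p) PySem.Set.empty := hdisj p (List.mem_cons_self ..)
    simp only [List.foldl_cons, List.filter_cons]
    rw [ih _ hnd.2 ?_]
    · rw [PySem.Dict.getD_modify]
      by_cases hq : q = f p
      · subst hq
        rw [PySem.Set.add_of_not_mem hmemp]
        simp [List.append_assoc]
      · have hne : (f p == q) = false := by simp; omega
        simp only [hne, if_neg hq, Bool.false_eq_true, if_false]
    · intro p' hp'
      rw [PySem.Dict.getD_modify]
      split_ifs with h
      · rw [PySem.Set.add_of_not_mem hmemp]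
        simp only [List.mem_append, List.mem_singleton]
        rintro (hin | hv)
        · exact hdisj p' (List.mem_cons_of_mem _ hp') (h ▸ hin)
        · exact hnd.1 (hv ▸ List.mem_map_of_mem hp')
      · exact hdisj p' (List.mem_cons_of_mem _ hp')

lemma pv_init_getD (q : Int) : pvInit.getD q PySem.Set.empty = ([] : List String) := by
  show (PySem.Dict.mk [(1,[]),(2,[]),(3,[]),(4,[]),(5,[]),(6,[]),(7,[]),(8,[]),(9,[])] : PySem.Dict Int (PySem.Set String)).getD q PySem.Set.empty = []
  simp only [PySem.Dict.getD, PySem.Dict.get?]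
  rcases h : List.find? (fun p => p.1 == q) ([(1,[]),(2,[]),(3,[]),(4,[]),(5,[]),(6,[]),(7,[]),(8,[]),(9,[])] : List (Int × List String)) with _|p
  · rw [h]; rfl
  · have hm := List.mem_of_find?_eq_some h
    have hp : p.2 = [] := by fin_cases hm <;> rfl
    rw [h]; simp [hp]

lemma pv_bodyB_items (lx ly : List String) (hx : lx.Nodup) :
    pvBodyB lx ly = [(1, pvG lx ly 1), (2, pvG lx ly 2), (3, pvG lx ly 3), (4, pvG lx ly 4),
      (5, pvG lx ly 5), (6, pvG lx ly 6), (7, pvG lx ly 7), (8, pvG lx ly 8), (9, pvG lx ly 9)] := by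
  have hFmem : ∀ p : Int × String, pvF lx ly p ∈ ([1,2,3,4,5,6,7,8,9] : List Int) := by
    intro p
    rcases pv_tercio_cases (lx.length : Int) ((pvRangoY ly).getD p.2 0) with h1|h1|h1 <;>
      rcases pv_tercio_cases (lx.length : Int) p.1 with h2|h2|h2 <;>
        unfold pvF <;> rw [h1, h2] <;> norm_num
  unfold pvBodyB
  have hkeys : ((PySem.List.enumerate lx).foldl
      (fun d p => d.modify (pvF lx ly p) PySem.Set.empty (fun s => PySem.Set.add s p.2)) pvInit).keys
      = [1,2,3,4,5,6,7,8,9] := by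
    rw [PySem.Dict.keys_foldl_modify_key (PySem.List.enumerate lx) (pvF lx ly) PySem.Set.empty
      (fun _ p => fun s => PySem.Set.add s p.2) pvInit]
    rw [show pvInit.keys = [1,2,3,4,5,6,7,8,9] from rfl]
    rw [PySem.Set.update_eq_append_filter]
    have hnil : (PySem.Set.ofList ((PySem.List.enumerate lx).map (pvF lx ly))).filter
        (fun y => !(PySem.Set.contains [1,2,3,4,5,6,7,8,9] y)) = [] := by
      apply List.filter_eq_nil_iff.mpr
      intro y hy
      have hy2 : y ∈ (PySem.List.enumerate lx).map (pvF lx ly) := (PySem.Set.mem_ofList ..).mp hy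
      obtain ⟨p, _, rfl⟩ := List.mem_map.mp hy2
      have hm := hFmem p
      simp only [PySem.Set.contains_eq_listContains]
      simp only [Bool.not_eq_true]
      simp
      simp at hm
      omega
    rw [hnil, List.append_nil]
  have hnodup : ((PySem.List.enumerate lx).foldl
      (fun d p => d.modify (pvF lx ly p) PySem.Set.empty (fun s => PySem.Set.add s p.2)) pvInit).keys.Nodup := by
    rw [hkeys]; decide
  rw [PySem.Dict.items_eq_map_keys _ hnodup PySem.Set.empty, hkeys]
  have hgetD : ∀ q, ((PySem.List.enumerate lx).foldl
      (fun d p => d.modify (pvF lx ly p) PySem.Set.empty (fun s => PySem.Set.add s p.2)) pvInit).getD q PySem.Set.empty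
      = pvG lx ly q := by
    intro q
    rw [pv_getD_fold_add (pvF lx ly) _ pvInit q
      (by rw [PySem.List.map_snd_enumerate]; exact hx)
      (by intro p _; rw [pv_init_getD]; simp)]
    rw [pv_init_getD]
    rfl
  simp only [List.map_cons, List.map_nil, hgetD]

lemma pv_quad_eq (lx ly : List String) (hx : lx.Nodup) (hy : ly.Nodup)
    (hlen : ly.length = lx.length) (hmem : ∀ x, x ∈ ly ↔ x ∈ lx)
    (tx ty : Int) (htx : tx = 0 ∨ tx = 1 ∨ tx = 2) (hty : ty = 0 ∨ ty = 1 ∨ ty = 2) :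
    pvG lx ly ((2 - ty) * 3 + tx + 1) = pvI lx ly tx ty := by
  have hsegx : (pvSeg lx tx).Sublist lx := (List.take_sublist ..).trans (List.drop_sublist ..)
  have hsegy : (pvSeg ly ty).Sublist ly := (List.take_sublist ..).trans (List.drop_sublist ..)
  have hndsegx : (pvSeg lx tx).Nodup := hsegx.nodup hx
  have hI_eq : pvI lx ly tx ty
      = (pvSeg lx tx).filter (fun x => PySem.Set.contains (PySem.Set.ofList (pvSeg ly ty)) x) := by
    unfold pvI
    rw [PySem.Set.ofList_eq_self_of_nodup _ hndsegx]
    rfl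
  have hG_sub : (pvG lx ly ((2 - ty) * 3 + tx + 1)).Sublist lx := by
    unfold pvG
    have h0 : ((PySem.List.enumerate lx).filter
        (fun p => pvF lx ly p == (2 - ty) * 3 + tx + 1)).Sublist (PySem.List.enumerate lx) :=
      List.filter_sublist
    have h1 := h0.map (fun p : Int × String => p.2)
    rwa [PySem.List.map_snd_enumerate] at h1
  have hI_sub : (pvI lx ly tx ty).Sublist lx := by
    rw [hI_eq]
    exact List.Sublist.trans List.filter_sublist hsegx
  -- membership characterisation of B's bucket
  have hmemG : ∀ x, x ∈ pvG lx ly ((2 - ty) * 3 + tx + 1) ↔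
      (x ∈ lx ∧ pvTercio (lx.length : Int) (lx.idxOf x : Int) = tx
        ∧ pvTercio (lx.length : Int) ((pvRangoY ly).getD x 0) = ty) := by
    intro x
    constructor
    · intro h
      simp only [pvG, List.mem_map, List.mem_filter] at h
      obtain ⟨p, ⟨hpe, hpf⟩, hpx⟩ := h
      obtain ⟨k, hk, rfl⟩ := (PySem.List.mem_enumerate_iff lx 0 p).mp hpe
      simp only at hpx
      subst hpx
      have hxmem : lx[k] ∈ lx := List.getElem_mem hk
      have hidx : lx.idxOf lx[k] = k := by
        have h2 : lx[lx.idxOf lx[k]]'(List.idxOf_lt_length_of_mem hxmem) = lx[k] :=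
          List.getElem_idxOf _
        exact (List.Nodup.getElem_inj_iff hx).mp h2
      have heq := beq_iff_eq.mp hpf
      simp only [pvF] at heq
      have hA := pv_tercio_cases (lx.length : Int) ((pvRangoY ly).getD lx[k] 0)
      have hB := pv_tercio_cases (lx.length : Int) (0 + (k : Int))
      have hAb : 0 ≤ pvTercio (lx.length : Int) ((pvRangoY ly).getD lx[k] 0)
          ∧ pvTercio (lx.length : Int) ((pvRangoY ly).getD lx[k] 0) ≤ 2 := by
        rcases hA with h|h|h <;> omega
      have hBb : 0 ≤ pvTercio (lx.length : Int) (0 + (k : Int))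
          ∧ pvTercio (lx.length : Int) (0 + (k : Int)) ≤ 2 := by
        rcases hB with h|h|h <;> omega
      have htxb : 0 ≤ tx ∧ tx ≤ 2 := by rcases htx with rfl|rfl|rfl <;> omega
      have htyb : 0 ≤ ty ∧ ty ≤ 2 := by rcases hty with rfl|rfl|rfl <;> omega
      refine ⟨hxmem, ?_, ?_⟩
      · rw [hidx]
        have : pvTercio (lx.length : Int) (0 + (k : Int)) = tx := by omega
        simpa using this
      · omega
    · rintro ⟨hxl, h1, h2⟩
      refine List.mem_map.mpr ⟨((lx.idxOf x : Int), x), List.mem_filter.mpr ⟨?_, ?_⟩, rfl⟩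
      · refine (PySem.List.mem_enumerate_iff lx 0 _).mpr
          ⟨lx.idxOf x, List.idxOf_lt_length_of_mem hxl, ?_⟩
        rw [List.getElem_idxOf]; simp
      · refine beq_iff_eq.mpr ?_
        simp only [pvF]
        rw [h1, h2]
  -- membership characterisation in terms of the segments
  have hchar_x : ∀ x ∈ lx,
      (pvTercio (lx.length : Int) (lx.idxOf x : Int) = tx ↔ x ∈ pvSeg lx tx) := by
    intro x hxl
    rw [pv_tercio_iff lx.length (lx.idxOf x) tx (List.idxOf_lt_length_of_mem hxl) htx]
    rw [pv_mem_seg lx hx tx htx x]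
    simp [hxl]
  have hchar_y : ∀ x ∈ ly,
      (pvTercio (lx.length : Int) ((pvRangoY ly).getD x 0) = ty ↔ x ∈ pvSeg ly ty) := by
    intro x hxy
    rw [pv_rango_getD ly hy x hxy, ← hlen]
    rw [pv_tercio_iff ly.length (ly.idxOf x) ty (List.idxOf_lt_length_of_mem hxy) hty]
    rw [pv_mem_seg ly hy ty hty x]
    simp [hxy]
  apply (List.Nodup.perm_iff_eq_of_sublist hx hG_sub hI_sub).mp
  apply (List.perm_ext_iff_of_nodup (hG_sub.nodup hx) (hI_sub.nodup hx)).mpr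
  intro x
  rw [hmemG x, hI_eq, List.mem_filter]
  simp only [PySem.Set.contains_iff, PySem.Set.mem_ofList]
  constructor
  · rintro ⟨hxl, h1, h2⟩
    exact ⟨(hchar_x x hxl).mp h1, (hchar_y x ((hmem x).mpr hxl)).mp h2⟩
  · rintro ⟨hsx, hsy⟩
    have hxl : x ∈ lx := hsegx.subset hsx
    have hxy : x ∈ ly := hsegy.subset hsy
    exact ⟨hxl, (hchar_x x hxl).mpr hsx, (hchar_y x hxy).mpr hsy⟩

lemma pv_central (lx ly : List String) (hx : lx.Nodup) (hy : ly.Nodup)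
    (hlen : ly.length = lx.length) (hmem : ∀ x, x ∈ ly ↔ x ∈ lx) :
    pvBodyA lx ly = pvBodyB lx ly := by
  have e : ∀ (q tx ty : Int), (2 - ty) * 3 + tx + 1 = q →
      (tx = 0 ∨ tx = 1 ∨ tx = 2) → (ty = 0 ∨ ty = 1 ∨ ty = 2) →
      pvG lx ly q = pvI lx ly tx ty := by
    rintro q tx ty rfl htx hty
    exact pv_quad_eq lx ly hx hy hlen hmem tx ty htx hty
  have hAeq : pvBodyA lx ly =
      (((((((((PySem.Dict.empty.insert 1 (PySem.Set.inter (PySem.Set.ofList (pvSeg lx 0)) (PySem.Set.ofList (pvSeg ly 2)))).insert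
        2 (PySem.Set.inter (PySem.Set.ofList (pvSeg lx 1)) (PySem.Set.ofList (pvSeg ly 2)))).insert
        3 (PySem.Set.inter (PySem.Set.ofList (pvSeg lx 2)) (PySem.Set.ofList (pvSeg ly 2)))).insert
        4 (PySem.Set.inter (PySem.Set.ofList (pvSeg lx 0)) (PySem.Set.ofList (pvSeg ly 1)))).insert
        5 (PySem.Set.inter (PySem.Set.ofList (pvSeg lx 1)) (PySem.Set.ofList (pvSeg ly 1)))).insert
        6 (PySem.Set.inter (PySem.Set.ofList (pvSeg lx 2)) (PySem.Set.ofList (pvSeg ly 1)))).insert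
        7 (PySem.Set.inter (PySem.Set.ofList (pvSeg lx 0)) (PySem.Set.ofList (pvSeg ly 0)))).insert
        8 (PySem.Set.inter (PySem.Set.ofList (pvSeg lx 1)) (PySem.Set.ofList (pvSeg ly 0)))).insert
        9 (PySem.Set.inter (PySem.Set.ofList (pvSeg lx 2)) (PySem.Set.ofList (pvSeg ly 0)))).items := by
    unfold pvBodyA
    rw [← pv_seg0 lx, ← pv_seg1 lx, ← pv_seg2 lx, ← pv_seg0 ly, ← pv_seg1 ly, ← pv_seg2 ly]
  rw [hAeq, pv_itemsA]
  rw [pv_bodyB_items lx ly hx]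
  rw [e 1 0 2 (by norm_num) (by norm_num) (by norm_num),
      e 2 1 2 (by norm_num) (by norm_num) (by norm_num),
      e 3 2 2 (by norm_num) (by norm_num) (by norm_num),
      e 4 0 1 (by norm_num) (by norm_num) (by norm_num),
      e 5 1 1 (by norm_num) (by norm_num) (by norm_num),
      e 6 2 1 (by norm_num) (by norm_num) (by norm_num),
      e 7 0 0 (by norm_num) (by norm_num) (by norm_num),
      e 8 1 0 (by norm_num) (by norm_num) (by norm_num),
      e 9 2 0 (by norm_num) (by norm_num) (by norm_num)]
  rfl

-- ===== VERDICT (by name: the statement is the Claim_ definition above) =====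
theorem crear_cuadrantes_spec : Claim_equal_crear_cuadrantes := by
  intro nodos _ _
  unfold Spec_crear_cuadrantes
  have hA : crear_cuadrantes nodos = pvBodyA
      (PySem.List.sorted (pvCoordX nodos).keys (fun k => (pvCoordX nodos).getD k 0) false)
      (PySem.List.sorted (pvCoordY nodos).keys (fun k => (pvCoordY nodos).getD k 0) false) := rfl
  have hB : crear_cuadrantes_alt nodos = pvBodyB
      (PySem.List.sorted (pvCoordX nodos).keys (fun k => (pvCoordX nodos).getD k 0) false)
      (PySem.List.sorted (pvCoordY nodos).keys (fun k => (pvCoordY nodos).getD k 0) false) := rfl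
  rw [hA, hB]
  have hkeq : (pvCoordY nodos).keys = (pvCoordX nodos).keys := by
    unfold pvCoordX pvCoordY
    rw [PySem.Dict.keys_foldl_insert_key nodos Prod.fst
        (fun _ p => (PySem.Dict.mk p.2).getD "y" 0) PySem.Dict.empty,
      PySem.Dict.keys_foldl_insert_key nodos Prod.fst
        (fun _ p => (PySem.Dict.mk p.2).getD "x" 0) PySem.Dict.empty]
  have hknd : (pvCoordX nodos).keys.Nodup :=
    PySem.Dict.nodup_keys_foldl_insert_key nodos Prod.fst
      (fun _ p => (PySem.Dict.mk p.2).getD "x" 0) PySem.Dict.empty PySem.Dict.nodup_keys_empty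
  have hkndy : (pvCoordY nodos).keys.Nodup := by rw [hkeq]; exact hknd
  have hxnd : (PySem.List.sorted (pvCoordX nodos).keys (fun k => (pvCoordX nodos).getD k 0) false).Nodup :=
    (PySem.List.sorted_perm _ _ _).nodup_iff.mpr hknd
  have hynd : (PySem.List.sorted (pvCoordY nodos).keys (fun k => (pvCoordY nodos).getD k 0) false).Nodup :=
    (PySem.List.sorted_perm _ _ _).nodup_iff.mpr hkndy
  have hlen : (PySem.List.sorted (pvCoordY nodos).keys (fun k => (pvCoordY nodos).getD k 0) false).length
      = (PySem.List.sorted (pvCoordX nodos).keys (fun k => (pvCoordX nodos).getD k 0) false).length := by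
    rw [PySem.List.length_sorted, PySem.List.length_sorted, hkeq]
  have hmem : ∀ x, x ∈ (PySem.List.sorted (pvCoordY nodos).keys (fun k => (pvCoordY nodos).getD k 0) false)
      ↔ x ∈ (PySem.List.sorted (pvCoordX nodos).keys (fun k => (pvCoordX nodos).getD k 0) false) := by
    intro x
    rw [PySem.List.mem_sorted, PySem.List.mem_sorted, hkeq]
  exact pv_central _ _ hxnd hynd hlen hmem
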